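-- pv_equiv track=rewrite | github.com/hussinsuleiman/neetcode-submissions | Data Structures & Algorithms/find-smallest-common-element-in-all-rows/submission-0.py | smallestCommonElement
-- ===== SOURCE A (Python) =====
-- from typing import List
--
-- def smallestCommonElement(mat: List[List[int]]) -> int:
--     m,n = len(mat), len(mat[0])
--     a = []
--
--     for i in range(1, m):
--         a.append(set(mat[i]))
--
--     for i in mat[0]:
--         valid = True
--
--         for s in a:
--             if i not in s:
--                 valid = False
--                 break
--
--         if valid:
--             return i
--
--     return -1
-- ===== SOURCE B (Python) =====
-- def smallestCommonElement(mat):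
--     m = len(mat)
--     cnt = {}
--     for row in mat[1:]:
--         for v in set(row):
--             cnt[v] = cnt.get(v, 0) + 1
--     target = m - 1
--     for v in mat[0]:
--         if cnt.get(v, 0) == target:
--             return v
--     return -1
-- ===== Notes on version B (the rewrite author's own statement) =====
-- stated objective: alternative
-- what changed: Replaced the per-candidate scan over a list of per-row sets by one aggregate frequency dict built from the deduped other rows, then a single flat pass over mat[0] returning the first value whose count equals m-1.
import Mathlib
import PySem

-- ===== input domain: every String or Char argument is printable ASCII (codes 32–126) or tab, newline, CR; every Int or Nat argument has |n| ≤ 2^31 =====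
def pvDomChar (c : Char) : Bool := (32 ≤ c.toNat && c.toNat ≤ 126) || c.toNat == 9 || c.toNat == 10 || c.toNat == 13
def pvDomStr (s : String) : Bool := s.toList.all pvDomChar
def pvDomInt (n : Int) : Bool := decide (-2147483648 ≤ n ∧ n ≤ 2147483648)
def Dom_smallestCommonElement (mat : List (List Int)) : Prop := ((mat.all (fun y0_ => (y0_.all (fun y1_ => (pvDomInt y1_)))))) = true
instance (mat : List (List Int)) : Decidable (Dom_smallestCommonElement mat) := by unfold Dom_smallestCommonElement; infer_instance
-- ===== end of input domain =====

-- B builds one aggregate frequency dict over the deduped other rows and makes a single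
-- flat pass over mat[0] (first value counted m-1 times), instead of A's per-candidate
-- scan over a list of per-row sets; objective: alternative algorithm, same result.

-- ===== PORT A =====
-- inner loop: valid = True; for s in a: if i not in s: valid = False; break
def pvA_check (i : Int) : List (PySem.Set Int) → Bool
  | [] => true
  | s :: rest => if !(PySem.Set.contains s i) then false else pvA_check i rest

-- outer loop: for i in mat[0]: … if valid: return i; fall-through: return -1
def pvA_find (a : List (PySem.Set Int)) : List Int → Int
  | [] => -1
  | i :: rest => if pvA_check i a then i else pvA_find a rest

def smallestCommonElement (mat : List (List Int)) : Int :=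
  let m : Int := PySem.List.len mat
  let a : List (PySem.Set Int) :=
    (PySem.List.pyRange 1 m 1).foldl
      (fun acc i => acc ++ [PySem.Set.ofList (PySem.List.pyGetD mat i [])]) []
  pvA_find a (PySem.List.pyGetD mat 0 [])

-- ===== PORT B =====
-- for v in mat[0]: if cnt.get(v, 0) == target: return v
def pvB_find (cnt : PySem.Dict Int Int) (target : Int) : List Int → Int
  | [] => -1
  | v :: rest => if cnt.getD v 0 == target then v else pvB_find cnt target rest

def smallestCommonElement_alt (mat : List (List Int)) : Int :=
  let m : Int := PySem.List.len mat
  let cnt : PySem.Dict Int Int :=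
    (PySem.List.slice mat (some 1) none).foldl
      (fun d row => (PySem.Set.ofList row).foldl (fun d v => d.modify v 0 (· + 1)) d)
      PySem.Dict.empty
  let target := m - 1
  pvB_find cnt target (PySem.List.pyGetD mat 0 [])

-- ===== PRECONDITION & SPEC =====
-- Pre_ excludes the empty matrix, on which the Python A (and B) raise IndexError at mat[0].
def Pre_smallestCommonElement (mat : List (List Int)) : Prop := mat ≠ []
instance (mat : List (List Int)) : Decidable (Pre_smallestCommonElement mat) := by
  unfold Pre_smallestCommonElement; infer_instance
def pvWitness_smallestCommonElement : List (List Int) := [[5, 1, 2], [2, 3, 1], [1, 2]]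

def Spec_smallestCommonElement (mat : List (List Int)) (out : Int) : Prop := out = smallestCommonElement_alt mat
instance (mat : List (List Int)) (out : Int) : Decidable (Spec_smallestCommonElement mat out) := by unfold Spec_smallestCommonElement; infer_instance

-- ===== CLAIM (what is proved, stated in full; the proofs are below) =====
def Claim_equal_smallestCommonElement : Prop := ∀ (mat : List (List Int)), Dom_smallestCommonElement mat → Pre_smallestCommonElement mat → Spec_smallestCommonElement mat (smallestCommonElement mat)

-- ===== LEMMAS AND PROOFS =====

-- A's index loop over range(1, m) builds exactly the tail's rows (as sets).
theorem pv_range_map_getD (f : List Int → PySem.Set Int) (l : List (List Int)) :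
    (PySem.List.pyRange 1 ((l.length : Nat) : Int) 1).map
      (fun i => f (PySem.List.pyGetD l i [])) = (l.drop 1).map f := by
  have h := PySem.List.map_pyGetD_pyRange' (xs := l) (d := ([] : List Int)) (a := (1 : Int)) (by norm_num)
  calc (PySem.List.pyRange 1 ((l.length : Nat) : Int) 1).map
        (fun i => f (PySem.List.pyGetD l i []))
      = ((PySem.List.pyRange 1 ((l.length : Nat) : Int) 1).map
        (fun i => PySem.List.pyGetD l i [])).map f := by rw [List.map_map]; rfl
    _ = (l.drop (1 : Int).toNat).map f := by rw [h]
    _ = (l.drop 1).map f := rfl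

theorem pv_cnt_getD (v : Int) :
    ∀ (rest : List (List Int)) (d : PySem.Dict Int Int),
      (rest.foldl
        (fun d row => (PySem.Set.ofList row).foldl (fun d x => d.modify x 0 (· + 1)) d)
        d).getD v 0
      = d.getD v 0 + (rest.countP (fun r => decide (v ∈ r)) : Int) := by
  intro rest
  induction rest with
  | nil => simp
  | cons r t ih =>
      intro d
      rw [List.foldl_cons, ih, PySem.Dict.getD_foldl_modify_add_one]
      have hn : (PySem.Set.ofList r).Nodup := PySem.Set.nodup_ofList r
      by_cases hv : v ∈ r
      · have : (PySem.Set.ofList r).count v = 1 := by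
          exact List.count_eq_one_of_mem hn (((PySem.Set.mem_ofList r v).mpr hv))
        simp [hv, this]; ring
      · have : (PySem.Set.ofList r).count v = 0 := by
          simp [List.count_eq_zero, PySem.Set.mem_ofList, hv]
        simp [hv, this]

theorem pv_check_eq_all (i : Int) : ∀ (rest : List (List Int)),
    pvA_check i (rest.map PySem.Set.ofList) = rest.all (fun r => decide (i ∈ r)) := by
  intro rest
  induction rest with
  | nil => rfl
  | cons r t ih =>
      simp only [List.map_cons, pvA_check, List.all_cons, ih]
      by_cases h : i ∈ r
      · simp [PySem.Set.contains, PySem.Set.mem_ofList, h]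
      · simp [PySem.Set.contains, PySem.Set.mem_ofList, h]

theorem pv_find_eq (rest : List (List Int)) (cnt : PySem.Dict Int Int)
    (hcnt : ∀ v : Int, cnt.getD v 0 = (rest.countP (fun r => decide (v ∈ r)) : Int)) :
    ∀ (l : List Int),
      pvA_find (rest.map PySem.Set.ofList) l = pvB_find cnt (rest.length : Int) l := by
  intro l
  induction l with
  | nil => rfl
  | cons v t ih =>
      simp only [pvA_find, pvB_find, pv_check_eq_all, hcnt]
      have hle : rest.countP (fun r => decide (v ∈ r)) ≤ rest.length := List.countP_le_length
      by_cases h : rest.all (fun r => decide (v ∈ r)) = true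
      · have : rest.countP (fun r => decide (v ∈ r)) = rest.length := by
          rw [List.countP_eq_length]
          intro r hr; exact (List.all_eq_true.mp h) r hr
        simp [h, this]
      · have : rest.countP (fun r => decide (v ∈ r)) ≠ rest.length := by
          intro hc
          apply h
          rw [List.all_eq_true]
          intro r hr
          exact List.countP_eq_length.mp hc r hr
        have hne : ((rest.countP (fun r => decide (v ∈ r)) : Int) == (rest.length : Int)) = false := by
          simp [this]
        simp [h, hne, ih]

-- ===== VERDICT (by name: the statement is the Claim_ definition above) =====
theorem smallestCommonElement_spec : Claim_equal_smallestCommonElement := by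
  intro mat _ hpre
  unfold Spec_smallestCommonElement smallestCommonElement smallestCommonElement_alt
  obtain ⟨r0, rest, rfl⟩ : ∃ r0 rest, mat = r0 :: rest := by
    cases mat with
    | nil => exact absurd rfl hpre
    | cons a b => exact ⟨a, b, rfl⟩
  simp only [PySem.List.len_eq, PySem.List.foldl_append_singleton_eq_map,
    PySem.List.pyGetD_zero_cons, PySem.List.slice_from_one, List.tail_cons,
    pv_range_map_getD, List.drop_succ_cons, List.drop_zero, List.nil_append]
  have htgt : ((r0 :: rest).length : Int) - 1 = (rest.length : Int) := by
    simp only [List.length_cons]; push_cast; ring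
  rw [htgt]
  exact pv_find_eq rest _ (fun v => by
    rw [pv_cnt_getD v rest PySem.Dict.empty]; simp) r0
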